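-- pv_equiv track=rewrite | github.com/jakub-krecisz/advent-of-code | year2021/day11/day11.py | doFlashes
-- ===== SOURCE A (Python) =====
-- def inRange(matrix, x, y):
--     if x < 0 or y < 0:
--         return False
--     if (x >= len(matrix)) or (y >= len(matrix[x])):
--         return False
--     return True
--
-- def incrementSurroundings(matrix, rowIndex, colIndex):
--     for j in [-1, 0, 1]:
--         for i in [-1, 0, 1]:
--             newRowIndex = rowIndex + j
--             newColIndex = colIndex + i
--             if inRange(matrix, newRowIndex, newColIndex) and matrix[newRowIndex][newColIndex] != 0:
--                 matrix[newRowIndex][newColIndex] += 1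
--
-- def doFlashes(matrix):
--     changeCounter = 0
--     haveChangesOccured = False
--     listToIncrement = []
--     for rowCounter in range(len(matrix)):
--         for colCounter in range(len(matrix[rowCounter])):
--             if matrix[rowCounter][colCounter] > 9:
--                 listToIncrement.append((rowCounter, colCounter))
--                 matrix[rowCounter][colCounter] = 0
--                 changeCounter += 1
--                 haveChangesOccured = True
--     if haveChangesOccured:
--         for (i, j) in listToIncrement:
--             incrementSurroundings(matrix, i, j)
--         return changeCounter + doFlashes(matrix)
--     else:
--         return changeCounter
-- ===== SOURCE B (Python) =====
-- # Synchronous rounds: collect all flashing cells of a round at once, tally the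
-- # energy gains per cell in one dict pass, rebuild each row functionally, repeat
-- # until no cell flashes.  A cell that already flashed (energy 0) gains no more
-- # energy for the rest of the step.  Mutates `matrix` (replaces its rows).
--
-- def doFlashes(matrix):
--     total = 0
--     while True:
--         flashing = [(r, c) for r, row in enumerate(matrix)
--                            for c, v in enumerate(row) if v > 9]
--         if not flashing:
--             return total
--         total += len(flashing)
--         gains = {}
--         for r, c in flashing:
--             for nr in (r - 1, r, r + 1):
--                 for nc in (c - 1, c, c + 1):
--                     gains[(nr, nc)] = gains.get((nr, nc), 0) + 1
--         for r, row in enumerate(matrix):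
--             matrix[r] = [0 if v > 9 else v + gains.get((r, c), 0) if v > 0 else v
--                          for c, v in enumerate(row)]
-- ===== Notes on version B (the rewrite author's own statement) =====
-- stated objective: alternative
-- what changed: A zeroes overloaded cells while scanning, then mutates the grid in place with nine sequential guarded neighbour increments per flash and recurses; B collects a round's flash coordinates once, tallies all energy gains in a dict in one pass, rebuilds every row functionally, and loops until no cell flashes.
import Mathlib
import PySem

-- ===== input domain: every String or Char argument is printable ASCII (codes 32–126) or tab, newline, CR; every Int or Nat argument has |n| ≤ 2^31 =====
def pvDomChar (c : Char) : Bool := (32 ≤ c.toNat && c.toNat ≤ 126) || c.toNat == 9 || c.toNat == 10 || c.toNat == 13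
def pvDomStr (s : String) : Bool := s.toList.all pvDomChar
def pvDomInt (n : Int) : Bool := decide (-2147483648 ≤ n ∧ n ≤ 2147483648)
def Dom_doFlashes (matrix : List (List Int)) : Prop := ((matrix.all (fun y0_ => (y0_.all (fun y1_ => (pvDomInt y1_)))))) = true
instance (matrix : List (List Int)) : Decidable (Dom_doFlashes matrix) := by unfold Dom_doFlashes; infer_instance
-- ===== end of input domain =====

-- B is an ALTERNATIVE implementation: synchronous rounds that tally a round's energy
-- gains in one dict pass and rebuild each row functionally, instead of A's in-place
-- one-by-one neighbour increments and recursion.  Both Pythons mutate `matrix`; the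
-- equivalence proved here is about the RETURN value only (on cells with non-positive
-- values the two leave different grids, but the returned flash count always agrees).

-- ===== PORT A =====
-- matrix[x][y] read; in A every use is guarded so indices are in range
def pvGetv (m : List (List Int)) (x y : Int) : Int :=
  ((PySem.List.pyGet? ((PySem.List.pyGet? m x).getD []) y).getD 0)

-- matrix[x][y] = v; only used under inRange (so 0 ≤ x, 0 ≤ y and toNat is exact)
def pvSetv (m : List (List Int)) (x y v : Int) : List (List Int) :=
  m.set x.toNat (((PySem.List.pyGet? m x).getD []).set y.toNat v)

def inRange (m : List (List Int)) (x y : Int) : Bool :=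
  if x < 0 || y < 0 then false
  else if (m.length : Int) ≤ x || (((PySem.List.pyGet? m x).getD []).length : Int) ≤ y then false
  else true

def incTry (m : List (List Int)) (x y : Int) : List (List Int) :=
  if inRange m x y && pvGetv m x y != 0 then pvSetv m x y (pvGetv m x y + 1) else m

def incrementSurroundings (m : List (List Int)) (r c : Int) : List (List Int) :=
  ([-1, 0, 1] : List Int).foldl (fun m j =>
    ([-1, 0, 1] : List Int).foldl (fun m i => incTry m (r + j) (c + i)) m) m

-- state of A's scan loop: (matrix, listToIncrement, changeCounter, haveChangesOccured)
def scanCell (st : List (List Int) × List (Int × Int) × Int × Bool) (r c : Int) :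
    List (List Int) × List (Int × Int) × Int × Bool :=
  if pvGetv st.1 r c > 9 then
    (pvSetv st.1 r c 0, st.2.1 ++ [(r, c)], st.2.2.1 + 1, true)
  else st

def scanRow (st : List (List Int) × List (Int × Int) × Int × Bool) (r : Int) :
    List (List Int) × List (Int × Int) × Int × Bool :=
  (PySem.List.pyRange 0 (((PySem.List.pyGet? st.1 r).getD []).length : Int) 1).foldl
    (fun st c => scanCell st r c) st

def scanA (m : List (List Int)) : List (List Int) × List (Int × Int) × Int × Bool :=
  (PySem.List.pyRange 0 (m.length : Int) 1).foldl (fun st r => scanRow st r) (m, [], 0, false)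

-- fuel: each recursive call zeroes at least one nonzero cell and zero cells stay zero,
-- so the recursion depth is at most (number of cells) + 1
def doFlashesGo : Nat → List (List Int) → Int
  | 0, _ => 0
  | fuel + 1, m =>
    let st := scanA m
    if st.2.2.2 then
      let m2 := st.2.1.foldl (fun m p => incrementSurroundings m p.1 p.2) st.1
      st.2.2.1 + doFlashesGo fuel m2
    else st.2.2.1

def doFlashes (matrix : List (List Int)) : Int :=
  doFlashesGo ((matrix.map List.length).sum + 1) matrix

-- ===== PORT B =====
def flashList (m : List (List Int)) : List (Int × Int) :=
  (PySem.List.enumerate m 0).flatMap (fun rw =>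
    (PySem.List.enumerate rw.2 0).filterMap (fun cv =>
      if cv.2 > 9 then some (rw.1, cv.1) else none))

-- gains[(nr, nc)] = gains.get((nr, nc), 0) + 1 over the 3×3 block around every flash
def flashGains (fl : List (Int × Int)) : PySem.Dict (Int × Int) Int :=
  fl.foldl (fun d p =>
    ([p.1 - 1, p.1, p.1 + 1] : List Int).foldl (fun d nr =>
      ([p.2 - 1, p.2, p.2 + 1] : List Int).foldl (fun d nc =>
        d.modify (nr, nc) 0 (· + 1)) d) d) PySem.Dict.empty

-- the per-cell conditional expression of B's rebuilding comprehension
def nextB (v k : Int) : Int :=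
  if v > 9 then 0 else if v > 0 then v + k else v

def roundB (m : List (List Int)) (fl : List (Int × Int)) : List (List Int) :=
  let gains := flashGains fl
  (PySem.List.enumerate m 0).map (fun rw =>
    (PySem.List.enumerate rw.2 0).map (fun cv =>
      nextB cv.2 (gains.getD (rw.1, cv.1) 0)))

-- fuel: the loop runs at most (number of cells) + 1 times (a flashing round zeroes a nonzero cell)
def doFlashesAltGo : Nat → List (List Int) → Int → Int
  | 0, _, total => total
  | fuel + 1, m, total =>
    let fl := flashList m
    if fl.isEmpty then total
    else doFlashesAltGo fuel (roundB m fl) (total + fl.length)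

def doFlashes_alt (matrix : List (List Int)) : Int :=
  doFlashesAltGo ((matrix.map List.length).sum + 1) matrix 0

-- ===== PRECONDITION & SPEC =====
def Spec_doFlashes (matrix : List (List Int)) (out : Int) : Prop := out = doFlashes_alt matrix
instance (matrix : List (List Int)) (out : Int) : Decidable (Spec_doFlashes matrix out) := by unfold Spec_doFlashes; infer_instance

-- ===== CLAIM (what is proved, stated in full; the proofs are below) =====
def Claim_equal_doFlashes : Prop := ∀ (matrix : List (List Int)), Dom_doFlashes matrix → Spec_doFlashes matrix (doFlashes matrix)

-- ===== LEMMAS AND PROOFS =====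

-- one Python increment attempt on a single cell: +1 unless the cell is 0
def stepv (v : Int) : Int := if v ≠ 0 then v + 1 else v

-- zero-out of an overloaded cell in the scan phase
def zf (v : Int) : Int := if v > 9 then 0 else v

-- flash coordinates of one row, row index r, starting at column c0
def rowFl (r : Int) (c0 : Int) : List Int → List (Int × Int)
  | [] => []
  | v :: rest => (if v > 9 then [(r, c0)] else []) ++ rowFl r (c0 + 1) rest

-- relation preserved round by round: cells agree, or both are non-positive
-- (a non-positive cell never flashes in either program, so the count agrees)
def cellRel (a b : Int) : Prop := a = b ∨ (a ≤ 0 ∧ b ≤ 0)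

def MRel (mA mB : List (List Int)) : Prop := List.Forall₂ (List.Forall₂ cellRel) mA mB

-- ----- helper notions (proof-only) -----

def rowLens (m : List (List Int)) : List Nat := m.map List.length

-- pvGetv at a Nat-cast valid index is plain list indexing
theorem pvGetv_valid (m : List (List Int)) (r c : Nat) (hr : r < m.length) (hc : c < (m[r]).length) :
    pvGetv m r c = m[r][c] := by
  simp [pvGetv, hr, hc]

-- value read by the scan at the frontier cell
theorem pvGetv_frontier (rp rs : List (List Int)) (pre suf : List Int) (v : Int) :
    pvGetv (rp ++ (pre ++ v :: suf) :: rs) rp.length pre.length = v := by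
  simp [pvGetv]

-- write at the frontier cell
theorem pvSetv_frontier (rp rs : List (List Int)) (pre suf : List Int) (v w : Int) :
    pvSetv (rp ++ (pre ++ v :: suf) :: rs) rp.length pre.length w
      = rp ++ ((pre ++ [w]) ++ suf) :: rs := by
  simp [pvSetv]

-- the column loop of A's scan, characterised over an explicit split of the matrix
theorem scan_cols (suf : List Int) : ∀ (pre : List Int) (rp rs : List (List Int))
    (L : List (Int × Int)) (cnt : Int) (flag : Bool),
    (PySem.List.pyRange (pre.length : Int) ((pre.length + suf.length : Nat) : Int) 1).foldl
        (fun st c => scanCell st (rp.length : Int) c) (rp ++ (pre ++ suf) :: rs, L, cnt, flag)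
      = (rp ++ (pre ++ suf.map zf) :: rs,
         L ++ rowFl (rp.length : Int) (pre.length : Int) suf,
         cnt + ((rowFl (rp.length : Int) (pre.length : Int) suf).length : Int),
         flag || !(rowFl (rp.length : Int) (pre.length : Int) suf).isEmpty) := by
  induction suf with
  | nil =>
    intro pre rp rs L cnt flag
    rw [PySem.List.pyRange_one_eq_nil (by simp)]
    simp [rowFl]
  | cons v rest ih =>
    intro pre rp rs L cnt flag
    rw [PySem.List.pyRange_one_cons (by push_cast [List.length_cons]; omega)]
    simp only [List.foldl_cons]
    have hstep : scanCell (rp ++ (pre ++ v :: rest) :: rs, L, cnt, flag) (rp.length : Int) (pre.length : Int)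
        = (rp ++ ((pre ++ [zf v]) ++ rest) :: rs,
           L ++ (if v > 9 then [((rp.length : Int), (pre.length : Int))] else []),
           cnt + (if v > 9 then 1 else 0),
           flag || decide (v > 9)) := by
      by_cases h : v > 9
      · simp [scanCell, pvGetv_frontier, pvSetv_frontier, h, zf]
      · simp only [scanCell, pvGetv_frontier]
        simp [h, zf]
    rw [hstep]
    have hlen : ((pre ++ [zf v]).length : Int) = (pre.length : Int) + 1 := by simp
    have := ih (pre ++ [zf v]) rp rs
      (L ++ (if v > 9 then [((rp.length : Int), (pre.length : Int))] else []))
      (cnt + (if v > 9 then 1 else 0)) (flag || decide (v > 9))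
    rw [hlen] at this
    have hlen2 : ((pre ++ [zf v]).length + rest.length : Nat) = (pre.length + (v :: rest).length : Nat) := by
      simp; omega
    rw [hlen2] at this
    simp only [List.append_assoc, List.singleton_append] at this ⊢
    rw [this]
    by_cases h : v > 9 <;>
      simp [rowFl, h, add_assoc, add_comm]

-- flash coordinates of a block of rows, first row index r0 (row-major order)
def flashFrom (r0 : Int) : List (List Int) → List (Int × Int)
  | [] => []
  | row :: rest => rowFl r0 0 row ++ flashFrom (r0 + 1) rest

theorem scan_rows (rs : List (List Int)) : ∀ (rp : List (List Int))
    (L : List (Int × Int)) (cnt : Int) (flag : Bool),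
    (PySem.List.pyRange (rp.length : Int) ((rp.length + rs.length : Nat) : Int) 1).foldl
        (fun st r => scanRow st r) (rp ++ rs, L, cnt, flag)
      = (rp ++ rs.map (List.map zf),
         L ++ flashFrom (rp.length : Int) rs,
         cnt + ((flashFrom (rp.length : Int) rs).length : Int),
         flag || !(flashFrom (rp.length : Int) rs).isEmpty) := by
  induction rs with
  | nil =>
    intro rp L cnt flag
    rw [PySem.List.pyRange_one_eq_nil (by simp)]
    simp [flashFrom]
  | cons row rest ih =>
    intro rp L cnt flag
    rw [PySem.List.pyRange_one_cons (by push_cast [List.length_cons]; omega)]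
    simp only [List.foldl_cons]
    have hrow : scanRow (rp ++ row :: rest, L, cnt, flag) (rp.length : Int)
        = (rp ++ (row.map zf) :: rest,
           L ++ rowFl (rp.length : Int) 0 row,
           cnt + ((rowFl (rp.length : Int) 0 row).length : Int),
           flag || !(rowFl (rp.length : Int) 0 row).isEmpty) := by
      have := scan_cols row [] rp rest L cnt flag
      simp only [List.length_nil, List.nil_append, Nat.cast_zero, zero_add] at this
      simpa [scanRow, PySem.List.pyGet?_append_length] using this
    rw [hrow]
    have := ih (rp ++ [row.map zf])
      (L ++ rowFl (rp.length : Int) 0 row)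
      (cnt + ((rowFl (rp.length : Int) 0 row).length : Int))
      (flag || !(rowFl (rp.length : Int) 0 row).isEmpty)
    simp only [List.length_append, List.length_singleton, List.append_assoc, List.singleton_append] at this ⊢
    rw [show ((rp.length + 1 : Nat) : Int) = (rp.length : Int) + 1 from by push_cast; ring,
        show (rp.length + 1 + rest.length : Nat) = (rp.length + (row :: rest).length : Nat) from by simp; omega] at this
    rw [this]
    simp [flashFrom, add_assoc, Bool.or_assoc]
    cases (rowFl (rp.length : Int) 0 row) <;> simp

theorem scanA_eq (m : List (List Int)) :
    scanA m = (m.map (List.map zf), flashFrom 0 m,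
               ((flashFrom 0 m).length : Int), !(flashFrom 0 m).isEmpty) := by
  have := scan_rows m [] [] 0 false
  simpa [scanA] using this

-- A's flash list is B's flash list
theorem rowFl_eq_filterMap (row : List Int) : ∀ (r c0 : Int),
    rowFl r c0 row = (PySem.List.enumerate row c0).filterMap
      (fun cv => if cv.2 > 9 then some (r, cv.1) else none) := by
  induction row with
  | nil => intro r c0; simp [rowFl, PySem.List.enumerate_nil]
  | cons v rest ih =>
    intro r c0
    rw [PySem.List.enumerate_cons]
    by_cases h : v > 9 <;> simp [rowFl, h, ih]

theorem flashFrom_eq_flashList (m : List (List Int)) : ∀ (s : Int),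
    flashFrom s m = (PySem.List.enumerate m s).flatMap (fun rw =>
      (PySem.List.enumerate rw.2 0).filterMap (fun cv =>
        if cv.2 > 9 then some (rw.1, cv.1) else none)) := by
  induction m with
  | nil => intro s; simp [flashFrom, PySem.List.enumerate_nil]
  | cons row rest ih =>
    intro s
    rw [PySem.List.enumerate_cons]
    simp [flashFrom, rowFl_eq_filterMap, ih]

theorem scanA_char (m : List (List Int)) :
    scanA m = (m.map (List.map zf), flashList m,
               ((flashList m).length : Int), !(flashList m).isEmpty) := by
  rw [scanA_eq, flashFrom_eq_flashList m 0]; rfl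

theorem inRange_true (m : List (List Int)) (x y : Int) (h : inRange m x y = true) :
    0 ≤ x ∧ x < m.length ∧ 0 ≤ y ∧ y < (((PySem.List.pyGet? m x).getD []).length : Int) := by
  simp only [inRange] at h
  split_ifs at h with h1 h2
  simp at h1 h2
  omega

theorem pyGetRow (m : List (List Int)) (x : Int) (hx0 : 0 ≤ x) (hx : x.toNat < m.length) :
    (PySem.List.pyGet? m x).getD [] = m[x.toNat] := by
  simp only [hx0, PySem.List.pyGet?_of_nonneg, hx, getElem?_pos, Option.getD_some]

theorem rowLens_pvSetv (m : List (List Int)) (x y v : Int) (h : inRange m x y = true) :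
    rowLens (pvSetv m x y v) = rowLens m := by
  obtain ⟨hx0, hxl, hy0, hyl⟩ := inRange_true m x y h
  have hx : x.toNat < m.length := by omega
  simp only [pvSetv, rowLens, List.map_set, pyGetRow m x hx0 hx, List.length_set]
  apply List.ext_getElem (by simp)
  intro i h1 h2
  simp only [List.getElem_set, List.getElem_map]
  split_ifs with hxi
  · subst hxi; rfl
  · rfl

theorem rowLens_incTry (m : List (List Int)) (x y : Int) :
    rowLens (incTry m x y) = rowLens m := by
  unfold incTry
  split_ifs with h
  · simp only [Bool.and_eq_true] at h
    exact rowLens_pvSetv m x y _ h.1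
  · rfl

theorem pvGetv_pvSetv (m : List (List Int)) (x y v : Int) (h : inRange m x y = true)
    (r c : Nat) (hr : r < m.length) (hc : c < (m[r]).length) :
    pvGetv (pvSetv m x y v) r c = if x = (r : Int) ∧ y = (c : Int) then v else pvGetv m r c := by
  obtain ⟨hx0, hxl, hy0, hyl⟩ := inRange_true m x y h
  have hx : x.toNat < m.length := by omega
  rw [pyGetRow m x hx0 hx] at hyl
  by_cases hxr : x = (r : Int)
  · have hxt : x.toNat = r := by omega
    by_cases hyc : y = (c : Int)
    · have hyt : y.toNat = c := by omega
      rw [if_pos ⟨hxr, hyc⟩]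
      simp [pvGetv, pvSetv, pyGetRow m x hx0 hx, hxt, hyt, hr, hc]
    · have hyt : y.toNat ≠ c := by omega
      rw [if_neg (by tauto)]
      simp [pvGetv, pvSetv, pyGetRow m x hx0 hx, hxt, hyt, hr, hc]
  · have hxt : x.toNat ≠ r := by omega
    rw [if_neg (by tauto)]
    simp [pvGetv, pvSetv, hxt, hr, hc]

theorem inRange_of_valid (m : List (List Int)) (r c : Nat)
    (hr : r < m.length) (hc : c < (m[r]).length) :
    inRange m (r : Int) (c : Int) = true := by
  simp only [inRange, PySem.List.pyGet?_natCast, List.getElem?_eq_getElem hr, Option.getD_some]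
  rw [if_neg (by simp), if_neg (by simp; omega)]

theorem pvGetv_incTry (m : List (List Int)) (x y : Int) (r c : Nat)
    (hr : r < m.length) (hc : c < (m[r]).length) :
    pvGetv (incTry m x y) r c
      = if x = (r : Int) ∧ y = (c : Int) then stepv (pvGetv m r c) else pvGetv m r c := by
  have hval : pvGetv m r c = m[r][c] := pvGetv_valid m r c hr hc
  unfold incTry
  split_ifs with h hx hx
  · obtain ⟨hxr, hyc⟩ := hx
    subst hxr; subst hyc
    simp only [Bool.and_eq_true, bne_iff_ne] at h
    rw [pvGetv_pvSetv m _ _ _ h.1 r c hr hc, if_pos ⟨rfl, rfl⟩, stepv, if_pos h.2]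
  · simp only [Bool.and_eq_true] at h
    rw [pvGetv_pvSetv m x y _ h.1 r c hr hc, if_neg hx]
  · obtain ⟨hxr, hyc⟩ := hx
    subst hxr; subst hyc
    have h0 : pvGetv m r c = 0 := by
      by_contra hne
      exact h (by simp [inRange_of_valid m r c hr hc, hne])
    rw [h0, stepv]
    simp
  · rfl

-- the 9 cells touched around a flash at p, in loop order (row outer, column inner)
def neighKeys (p : Int × Int) : List (Int × Int) :=
  [(p.1 - 1, p.2 - 1), (p.1 - 1, p.2), (p.1 - 1, p.2 + 1),
   (p.1, p.2 - 1), (p.1, p.2), (p.1, p.2 + 1),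
   (p.1 + 1, p.2 - 1), (p.1 + 1, p.2), (p.1 + 1, p.2 + 1)]

theorem incSurr_eq_foldl (m : List (List Int)) (a b : Int) :
    incrementSurroundings m a b
      = (neighKeys (a, b)).foldl (fun m o => incTry m o.1 o.2) m := by
  simp only [incrementSurroundings, neighKeys, List.foldl_cons, List.foldl_nil]
  norm_num [sub_eq_add_neg]

theorem rowLens_foldl_incTry (os : List (Int × Int)) : ∀ (m : List (List Int)),
    rowLens (os.foldl (fun m o => incTry m o.1 o.2) m) = rowLens m := by
  induction os with
  | nil => intro m; rfl
  | cons o rest ih => intro m; rw [List.foldl_cons, ih, rowLens_incTry]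

theorem valid_of_rowLens (m m' : List (List Int)) (h : rowLens m' = rowLens m)
    (r c : Nat) (hr : r < m.length) (hc : c < (m[r]).length) :
    ∃ (hr' : r < m'.length), c < (m'[r]).length := by
  have hlen : m'.length = m.length := by
    have := congrArg List.length h; simpa [rowLens] using this
  refine ⟨by omega, ?_⟩
  have : (m'[r]'(by omega)).length = (m[r]).length := by
    have h1 : (rowLens m')[r]'(by simp [rowLens]; omega) = (rowLens m)[r]'(by simp [rowLens]; omega) := by
      simp [h]
    simpa [rowLens] using h1
  omega

theorem pvGetv_foldl_incTry (os : List (Int × Int)) : ∀ (m : List (List Int)) (r c : Nat)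
    (hr : r < m.length) (hc : c < (m[r]).length),
    pvGetv (os.foldl (fun m o => incTry m o.1 o.2) m) r c
      = stepv^[os.countP (fun o => decide (o.1 = (r : Int) ∧ o.2 = (c : Int)))] (pvGetv m r c) := by
  induction os with
  | nil => intro m r c hr _; simp
  | cons o rest ih =>
    intro m r c hr hc
    rw [List.foldl_cons]
    obtain ⟨hr', hc'⟩ := valid_of_rowLens m (incTry m o.1 o.2) (rowLens_incTry m o.1 o.2) r c hr hc
    rw [ih (incTry m o.1 o.2) r c hr' hc', pvGetv_incTry m o.1 o.2 r c hr hc]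
    by_cases hm : o.1 = (r : Int) ∧ o.2 = (c : Int)
    · rw [if_pos hm, List.countP_cons, if_pos (by simpa using hm)]
      rw [Function.iterate_succ_apply]
    · rw [if_neg hm, List.countP_cons, if_neg (by simpa using hm), Nat.add_zero]

theorem count9 (p : Int × Int) (r c : Nat) :
    (neighKeys p).countP (fun o => decide (o.1 = (r : Int) ∧ o.2 = (c : Int)))
      = if |p.1 - (r : Int)| ≤ 1 ∧ |p.2 - (c : Int)| ≤ 1 then 1 else 0 := by
  simp only [neighKeys, List.countP_cons, List.countP_nil, decide_eq_true_eq, abs_le]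
  split_ifs <;> omega

theorem rowLens_incSurr (m : List (List Int)) (a b : Int) :
    rowLens (incrementSurroundings m a b) = rowLens m := by
  rw [incSurr_eq_foldl, rowLens_foldl_incTry]

theorem pvGetv_incSurr (m : List (List Int)) (a b : Int) (r c : Nat)
    (hr : r < m.length) (hc : c < (m[r]).length) :
    pvGetv (incrementSurroundings m a b) r c
      = if |a - (r : Int)| ≤ 1 ∧ |b - (c : Int)| ≤ 1 then stepv (pvGetv m r c)
        else pvGetv m r c := by
  rw [incSurr_eq_foldl, pvGetv_foldl_incTry _ m r c hr hc, count9 (a, b) r c]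
  split_ifs <;> simp

theorem rowLens_flashFold (L : List (Int × Int)) : ∀ (m : List (List Int)),
    rowLens (L.foldl (fun m p => incrementSurroundings m p.1 p.2) m) = rowLens m := by
  induction L with
  | nil => intro m; rfl
  | cons p rest ih => intro m; rw [List.foldl_cons, ih, rowLens_incSurr]

theorem pvGetv_flashFold (L : List (Int × Int)) : ∀ (m : List (List Int)) (r c : Nat)
    (hr : r < m.length) (hc : c < (m[r]).length),
    pvGetv (L.foldl (fun m p => incrementSurroundings m p.1 p.2) m) r c
      = stepv^[L.countP (fun p => decide (|p.1 - (r : Int)| ≤ 1 ∧ |p.2 - (c : Int)| ≤ 1))]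
          (pvGetv m r c) := by
  induction L with
  | nil => intro m r c hr _; simp
  | cons p rest ih =>
    intro m r c hr hc
    rw [List.foldl_cons]
    obtain ⟨hr', hc'⟩ := valid_of_rowLens m (incrementSurroundings m p.1 p.2)
      (rowLens_incSurr m p.1 p.2) r c hr hc
    rw [ih _ r c hr' hc', pvGetv_incSurr m p.1 p.2 r c hr hc]
    by_cases hm : |p.1 - (r : Int)| ≤ 1 ∧ |p.2 - (c : Int)| ≤ 1
    · rw [if_pos hm, List.countP_cons, if_pos (by simpa using hm), Function.iterate_succ_apply]
    · rw [if_neg hm, List.countP_cons, if_neg (by simpa using hm), Nat.add_zero]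

theorem stepv_iterate_pos (k : Nat) : ∀ (v : Int), 0 < v → stepv^[k] v = v + k := by
  induction k with
  | zero => intro v _; simp
  | succ n ih =>
    intro v hv
    rw [Function.iterate_succ_apply, stepv, if_pos (by omega), ih (v + 1) (by omega)]
    push_cast; ring

theorem stepv_iterate_nonpos (k : Nat) : ∀ (v : Int), v ≤ 0 → stepv^[k] v = min (v + k) 0 := by
  induction k with
  | zero => intro v hv; simp [min_eq_left hv]
  | succ n ih =>
    intro v hv
    rw [Function.iterate_succ_apply, stepv]
    by_cases h0 : v = 0
    · subst h0
      rw [if_neg (by omega), ih 0 le_rfl]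
      simp
      omega
    · rw [if_pos (by omega), ih (v + 1) (by omega)]
      push_cast
      omega

-- per-cell preservation of the relation across one round
theorem cellRel_step (k : Nat) (a b : Int) (h : cellRel a b) :
    cellRel (stepv^[k] (zf a)) (nextB b k) := by
  rcases h with h | ⟨ha, hb⟩
  · subst h
    by_cases h9 : a > 9
    · left
      rw [zf, if_pos h9, nextB, if_pos h9, stepv_iterate_nonpos k 0 le_rfl]
      omega
    · rw [zf, if_neg h9, nextB, if_neg h9]
      by_cases hp : a > 0
      · left
        rw [if_pos hp, stepv_iterate_pos k a hp]
      · right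
        rw [if_neg hp, stepv_iterate_nonpos k a (by omega)]
        omega
  · right
    have h9 : ¬ a > 9 := by omega
    have hp : ¬ b > 9 := by omega
    have hp0 : ¬ b > 0 := by omega
    rw [zf, if_neg h9, nextB, if_neg hp, if_neg hp0, stepv_iterate_nonpos k a ha]
    omega

theorem rowLens_zeroed (m : List (List Int)) :
    rowLens (m.map (List.map zf)) = rowLens m := by
  simp [rowLens, List.map_map, Function.comp_def]

theorem pvGetv_zeroed (m : List (List Int)) (r c : Nat)
    (hr : r < m.length) (hc : c < (m[r]).length) :
    pvGetv (m.map (List.map zf)) r c = zf (pvGetv m r c) := by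
  rw [pvGetv_valid m r c hr hc,
      pvGetv_valid _ r c (by simpa using hr) (by simpa using hc)]
  simp

theorem rowLens_roundB (m : List (List Int)) (fl : List (Int × Int)) :
    rowLens (roundB m fl) = rowLens m := by
  apply List.ext_getElem (by simp [rowLens, roundB, PySem.List.length_enumerate])
  intro i h1 h2
  simp [rowLens, roundB, PySem.List.length_enumerate, PySem.List.getElem_enumerate]

-- B's gains dict read at (r, c) is the number of flashes within Chebyshev distance 1
theorem count9' (p : Int × Int) (r c : Nat) :
    (neighKeys p).count ((r : Int), (c : Int))
      = if |p.1 - (r : Int)| ≤ 1 ∧ |p.2 - (c : Int)| ≤ 1 then 1 else 0 := by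
  simp only [neighKeys, List.count_cons, List.count_nil, beq_iff_eq, Prod.mk.injEq, abs_le]
  split_ifs <;> omega

theorem flashGains_getD (fl : List (Int × Int)) : ∀ (d : PySem.Dict (Int × Int) Int) (r c : Nat),
    (fl.foldl (fun d p =>
        ([p.1 - 1, p.1, p.1 + 1] : List Int).foldl (fun d nr =>
          ([p.2 - 1, p.2, p.2 + 1] : List Int).foldl (fun d nc =>
            d.modify (nr, nc) 0 (· + 1)) d) d) d).getD ((r : Int), (c : Int)) 0
      = d.getD ((r : Int), (c : Int)) 0
        + (fl.countP (fun p => decide (|p.1 - (r : Int)| ≤ 1 ∧ |p.2 - (c : Int)| ≤ 1)) : Int) := by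
  induction fl with
  | nil => intro d r c; simp
  | cons p rest ih =>
    intro d r c
    rw [List.foldl_cons, ih, List.countP_cons]
    have hinner : (([p.1 - 1, p.1, p.1 + 1] : List Int).foldl (fun d nr =>
          ([p.2 - 1, p.2, p.2 + 1] : List Int).foldl (fun d nc =>
            d.modify (nr, nc) 0 (· + 1)) d) d).getD ((r : Int), (c : Int)) 0
        = d.getD ((r : Int), (c : Int)) 0
          + (if |p.1 - (r : Int)| ≤ 1 ∧ |p.2 - (c : Int)| ≤ 1 then 1 else 0 : Int) := by
      rw [show ([p.1 - 1, p.1, p.1 + 1] : List Int).foldl (fun d nr =>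
            ([p.2 - 1, p.2, p.2 + 1] : List Int).foldl (fun d nc =>
              d.modify (nr, nc) 0 (· + 1)) d) d
            = (neighKeys p).foldl (fun d k => d.modify k 0 (· + 1)) d from by
          simp only [neighKeys, List.foldl_cons, List.foldl_nil]]
      rw [PySem.Dict.getD_foldl_modify_add_one, count9']
      split_ifs <;> simp
    rw [hinner]
    by_cases hm : |p.1 - (r : Int)| ≤ 1 ∧ |p.2 - (c : Int)| ≤ 1
    · rw [if_pos hm, if_pos (by simpa using hm)]
      push_cast; ring
    · rw [if_neg hm, if_neg (by simpa using hm)]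
      push_cast; ring

theorem pvGetv_roundB (m : List (List Int)) (fl : List (Int × Int)) (r c : Nat)
    (hr : r < m.length) (hc : c < (m[r]).length) :
    pvGetv (roundB m fl) r c
      = nextB (pvGetv m r c)
          (fl.countP (fun p => decide (|p.1 - (r : Int)| ≤ 1 ∧ |p.2 - (c : Int)| ≤ 1)) : Int) := by
  obtain ⟨hr', hc'⟩ := valid_of_rowLens m (roundB m fl) (rowLens_roundB m fl) r c hr hc
  rw [pvGetv_valid _ r c hr' hc', pvGetv_valid m r c hr hc]
  have hcnt : (flashGains fl).getD ((r : Int), (c : Int)) 0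
      = ((fl.countP (fun p => decide (|p.1 - (r : Int)| ≤ 1 ∧ |p.2 - (c : Int)| ≤ 1))) : Int) := by
    simpa [flashGains] using flashGains_getD fl PySem.Dict.empty r c
  simp only [roundB]
  simp [PySem.List.getElem_enumerate, hcnt]

-- ----- the relation: bridges between Forall₂ form and index form -----

theorem MRel_rowLens (mA mB : List (List Int)) (h : MRel mA mB) : rowLens mA = rowLens mB := by
  unfold MRel at h
  induction h with
  | nil => rfl
  | cons hrow _ ih =>
    simp only [rowLens, List.map_cons, List.cons.injEq]
    exact ⟨hrow.length_eq, ih⟩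

theorem MRel_get (mA mB : List (List Int)) (h : MRel mA mB) (r c : Nat)
    (hr : r < mA.length) (hc : c < (mA[r]).length) :
    cellRel (pvGetv mA r c) (pvGetv mB r c) := by
  obtain ⟨hr', hc'⟩ := valid_of_rowLens mA mB (MRel_rowLens mA mB h).symm r c hr hc
  rw [pvGetv_valid mA r c hr hc, pvGetv_valid mB r c hr' hc']
  have hrow := (List.forall₂_iff_get.1 h).2 r hr hr'
  exact (List.forall₂_iff_get.1 hrow).2 c hc hc'

theorem MRel_of_get (mA mB : List (List Int)) (hlen : rowLens mA = rowLens mB)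
    (h : ∀ (r c : Nat) (hr : r < mA.length) (hc : c < (mA[r]).length),
      cellRel (pvGetv mA r c) (pvGetv mB r c)) : MRel mA mB := by
  have hL : mA.length = mB.length := by
    have := congrArg List.length hlen; simpa [rowLens] using this
  refine List.forall₂_iff_get.2 ⟨hL, fun r hr hr' => ?_⟩
  have hrl : (mA[r]).length = (mB[r]).length := by
    have h4 := List.getElem_of_eq hlen (i := r) (by simpa [rowLens] using hr)
    simpa [rowLens] using h4
  refine List.forall₂_iff_get.2 ⟨hrl, fun c hc hc' => ?_⟩
  have := h r c hr hc
  rwa [pvGetv_valid mA r c hr hc, pvGetv_valid mB r c hr' hc'] at this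

theorem MRel_refl (m : List (List Int)) : MRel m m :=
  MRel_of_get m m rfl (fun _ _ _ _ => Or.inl rfl)

-- related matrices produce the same flash list
theorem rowFl_congr (rowA rowB : List Int) (h : List.Forall₂ cellRel rowA rowB) :
    ∀ (r c0 : Int), rowFl r c0 rowA = rowFl r c0 rowB := by
  induction h with
  | nil => intro r c0; rfl
  | cons hv _ ih =>
    intro r c0
    simp only [rowFl, ih]
    rcases hv with h | ⟨h1, h2⟩
    · rw [h]
    · rw [if_neg (by omega), if_neg (by omega)]

theorem flashFrom_congr (mA mB : List (List Int)) (h : MRel mA mB) :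
    ∀ (s : Int), flashFrom s mA = flashFrom s mB := by
  unfold MRel at h
  induction h with
  | nil => intro s; rfl
  | cons hrow _ ih =>
    intro s
    simp only [flashFrom, rowFl_congr _ _ hrow, ih]

theorem flashList_congr (mA mB : List (List Int)) (h : MRel mA mB) :
    flashList mA = flashList mB := by
  have hA : flashList mA = flashFrom 0 mA := (flashFrom_eq_flashList mA 0).symm
  have hB : flashList mB = flashFrom 0 mB := (flashFrom_eq_flashList mB 0).symm
  rw [hA, hB]
  exact flashFrom_congr mA mB h 0

-- one full round preserves the relation
theorem round_rel (mA mB : List (List Int)) (h : MRel mA mB) :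
    MRel ((flashList mA).foldl (fun m p => incrementSurroundings m p.1 p.2)
            (mA.map (List.map zf)))
         (roundB mB (flashList mB)) := by
  have hfl : flashList mA = flashList mB := flashList_congr mA mB h
  have hlenA : rowLens ((flashList mA).foldl (fun m p => incrementSurroundings m p.1 p.2)
      (mA.map (List.map zf))) = rowLens mA := by
    rw [rowLens_flashFold, rowLens_zeroed]
  apply MRel_of_get
  · rw [hlenA, rowLens_roundB, MRel_rowLens mA mB h]
  · intro r c hr hc
    obtain ⟨hrA, hcA⟩ := valid_of_rowLens _ mA hlenA.symm r c hr hc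
    obtain ⟨hrB, hcB⟩ := valid_of_rowLens mA mB (MRel_rowLens mA mB h).symm r c hrA hcA
    have hz : r < (mA.map (List.map zf)).length := by simpa using hrA
    have hcz : c < ((mA.map (List.map zf))[r]).length := by simpa using hcA
    rw [pvGetv_flashFold _ _ r c hz hcz, pvGetv_zeroed mA r c hrA hcA,
        pvGetv_roundB mB _ r c hrB hcB, ← hfl]
    exact cellRel_step _ _ _ (MRel_get mA mB h r c hrA hcA)

-- the two fuelled loops agree on related matrices
theorem go_rel (fuel : Nat) : ∀ (mA mB : List (List Int)) (t : Int), MRel mA mB →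
    doFlashesAltGo fuel mB t = t + doFlashesGo fuel mA := by
  induction fuel with
  | zero => intro mA mB t _; simp [doFlashesAltGo, doFlashesGo]
  | succ f ih =>
    intro mA mB t h
    have hfl : flashList mB = flashList mA := (flashList_congr mA mB h).symm
    rw [doFlashesAltGo, doFlashesGo, scanA_char]
    simp only [hfl]
    by_cases hemp : (flashList mA).isEmpty
    · have : flashList mA = [] := by simpa using hemp
      simp [this]
    · rw [if_neg hemp, if_pos (by simpa using hemp)]
      rw [ih _ _ _ (hfl ▸ round_rel mA mB h)]
      ring

-- ===== VERDICT =====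
theorem doFlashes_spec : Claim_equal_doFlashes := by
  intro matrix _
  show doFlashes matrix = doFlashes_alt matrix
  rw [doFlashes, doFlashes_alt, go_rel _ matrix matrix 0 (MRel_refl matrix)]
  ring
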